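-- pv_equiv track=rewrite | github.com/sedhossein/google-foobar | 3-2 Doomsday Fuel/index.py | pathForRMatrix
-- ===== SOURCE A (Python) =====
-- def getTerminalStates(states):
--     terminalStates = []
--     for stateNumber, state in enumerate(states):
--         if sum(state) == 0:
--             terminalStates.append(stateNumber)
--
--     return terminalStates
--
-- def getNonTerminalStates(states):
--     nonTerminalStates = []
--     for stateNumber, state in enumerate(states):
--         if sum(state) != 0:
--             nonTerminalStates.append(stateNumber)
--
--     return nonTerminalStates
--
-- def pathForRMatrix(row, column, states):
--     terminalStates = getTerminalStates(states)
--     nonTerminalStates = getNonTerminalStates(states)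
--
--     x, y = 0, 0
--     for index, value in enumerate(nonTerminalStates):
--         if value == row:
--             x = index
--
--     for index, value in enumerate(terminalStates):
--         if value == column:
--             y = index
--
--     return x, y
-- ===== SOURCE B (Python) =====
-- def pathForRMatrix(row, column, states):
--     x, y = 0, 0
--     nt, t = 0, 0
--     for i, state in enumerate(states):
--         if sum(state) == 0:
--             if i == column:
--                 y = t
--             t += 1
--         else:
--             if i == row:
--                 x = nt
--             nt += 1
--     return x, y
-- ===== Notes on version B (the rewrite author's own statement) =====
-- stated objective: simpler
-- what changed: Fuses A's two list-building helpers and two scan loops into one pass over states that maintains running terminal/non-terminal counters and records x/y directly.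
import Mathlib
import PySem

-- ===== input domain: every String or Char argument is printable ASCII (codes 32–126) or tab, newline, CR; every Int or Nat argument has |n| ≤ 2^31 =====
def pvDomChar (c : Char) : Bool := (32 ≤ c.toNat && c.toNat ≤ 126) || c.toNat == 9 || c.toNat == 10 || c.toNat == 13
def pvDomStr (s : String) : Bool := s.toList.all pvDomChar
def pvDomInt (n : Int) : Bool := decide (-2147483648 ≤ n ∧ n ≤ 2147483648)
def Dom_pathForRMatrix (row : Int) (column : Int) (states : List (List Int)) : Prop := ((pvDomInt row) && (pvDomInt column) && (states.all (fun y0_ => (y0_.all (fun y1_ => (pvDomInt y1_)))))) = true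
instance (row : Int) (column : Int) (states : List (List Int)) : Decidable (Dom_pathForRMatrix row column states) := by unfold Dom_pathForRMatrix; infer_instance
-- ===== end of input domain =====

-- B fuses A's two list-building helpers and two scan loops into one pass with running counters (objective: simpler).

-- ===== PORT A =====
-- getTerminalStates: collect enumerate-indices of states with sum 0
def pvTermAux (states : List (List Int)) (i : Int) : List Int :=
  match states with
  | [] => []
  | s :: rest => if s.sum = 0 then i :: pvTermAux rest (i + 1) else pvTermAux rest (i + 1)

-- getNonTerminalStates: collect enumerate-indices of states with sum ≠ 0
def pvNonTermAux (states : List (List Int)) (i : Int) : List Int :=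
  match states with
  | [] => []
  | s :: rest => if s.sum ≠ 0 then i :: pvNonTermAux rest (i + 1) else pvNonTermAux rest (i + 1)

-- 'for index, value in enumerate(xs): if value == target: acc = index'
def pvScan (xs : List Int) (target : Int) (idx : Int) (acc : Int) : Int :=
  match xs with
  | [] => acc
  | v :: rest => pvScan rest target (idx + 1) (if v = target then idx else acc)

def pathForRMatrix (row : Int) (column : Int) (states : List (List Int)) : Int × Int :=
  let terminalStates := pvTermAux states 0
  let nonTerminalStates := pvNonTermAux states 0
  (pvScan nonTerminalStates row 0 0, pvScan terminalStates column 0 0)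

-- ===== PORT B =====
-- single pass: i enumerates states, nt/t count non-terminal/terminal states seen, x/y are the results
def pvAltLoop (row : Int) (column : Int) (states : List (List Int))
    (i nt t x y : Int) : Int × Int :=
  match states with
  | [] => (x, y)
  | s :: rest =>
      if s.sum = 0 then
        pvAltLoop row column rest (i + 1) nt (t + 1) x (if i = column then t else y)
      else
        pvAltLoop row column rest (i + 1) (nt + 1) t (if i = row then nt else x) y

def pathForRMatrix_alt (row : Int) (column : Int) (states : List (List Int)) : Int × Int :=
  pvAltLoop row column states 0 0 0 0 0

-- ===== PRECONDITION & SPEC =====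
def Spec_pathForRMatrix (row : Int) (column : Int) (states : List (List Int)) (out : Int × Int) : Prop := out = pathForRMatrix_alt row column states
instance (row : Int) (column : Int) (states : List (List Int)) (out : Int × Int) : Decidable (Spec_pathForRMatrix row column states out) := by unfold Spec_pathForRMatrix; infer_instance

-- ===== CLAIM (what is proved, stated in full; the proofs are below) =====
def Claim_equal_pathForRMatrix : Prop := ∀ (row : Int) (column : Int) (states : List (List Int)), Dom_pathForRMatrix row column states → Spec_pathForRMatrix row column states (pathForRMatrix row column states)

-- ===== LEMMAS AND PROOFS =====
theorem pvAltLoop_eq (row column : Int) :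
    ∀ (states : List (List Int)) (i nt t x y : Int),
      pvAltLoop row column states i nt t x y =
        (pvScan (pvNonTermAux states i) row nt x, pvScan (pvTermAux states i) column t y) := by
  intro states
  induction states with
  | nil => intro i nt t x y; simp [pvAltLoop, pvNonTermAux, pvTermAux, pvScan]
  | cons s rest ih =>
      intro i nt t x y
      by_cases h : s.sum = 0 <;>
        simp [pvAltLoop, pvNonTermAux, pvTermAux, pvScan, h, ih]

-- ===== VERDICT (by name: the statement is the Claim_ definition above) =====
theorem pathForRMatrix_spec : Claim_equal_pathForRMatrix := by
  intro row column states _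
  unfold Spec_pathForRMatrix pathForRMatrix pathForRMatrix_alt
  simp [pvAltLoop_eq]
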